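-- pv_equiv track=rewrite | github.com/anupyadav27/threat-engine | engines/encryption-security/encryption_security_engine/analyzer/blast_radius.py | _most_sensitive_classification
-- ===== SOURCE A (Python) =====
-- def _most_sensitive_classification(classifications: list) -> str:
--     """Return the most sensitive classification from a list."""
--     priority = {"restricted": 0, "confidential": 1, "internal": 2, "public": 3}
--     best = "internal"
--     best_rank = 99
--     for c in classifications:
--         rank = priority.get(str(c).lower(), 99)
--         if rank < best_rank:
--             best_rank = rank
--             best = str(c).lower()
--     return best
-- ===== SOURCE B (Python) =====
-- def _most_sensitive_classification(classifications: list) -> str: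
--     """Return the most sensitive classification from a list."""
--     present = {str(c).lower() for c in classifications}
--     for level in ("restricted", "confidential", "internal", "public"):
--         if level in present:
--             return level
--     return "internal"
-- ===== Notes on version B (the rewrite author's own statement) =====
-- stated objective: idiomatic
-- what changed: B builds a lowercased set once and iterates the four priority levels in sensitivity order returning the first one present, instead of scanning the data tracking a running minimum rank and best name.
import Mathlib
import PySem

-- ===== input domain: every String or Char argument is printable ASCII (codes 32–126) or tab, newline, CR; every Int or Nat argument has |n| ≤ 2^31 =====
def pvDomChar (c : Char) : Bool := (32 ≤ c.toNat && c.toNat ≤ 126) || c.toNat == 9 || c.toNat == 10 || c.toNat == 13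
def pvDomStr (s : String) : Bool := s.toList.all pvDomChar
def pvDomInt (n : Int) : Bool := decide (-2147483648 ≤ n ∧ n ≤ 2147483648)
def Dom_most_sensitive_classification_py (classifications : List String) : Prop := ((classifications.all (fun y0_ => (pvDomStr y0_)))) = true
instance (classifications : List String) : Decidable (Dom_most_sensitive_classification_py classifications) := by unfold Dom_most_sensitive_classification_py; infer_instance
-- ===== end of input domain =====

-- B replaces A's running-minimum scan over the data by a lowercased set built once
-- plus a loop over the four priority levels in sensitivity order (idiomatic; same O(n) cost).

-- ===== PORT A =====
def most_sensitive_classification_py (classifications : List String) : String :=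
  let priority : PySem.Dict String Int :=
    PySem.Dict.ofList [("restricted", 0), ("confidential", 1), ("internal", 2), ("public", 3)]
  (classifications.foldl
    (fun (st : String × Int) c =>
      let rank := priority.getD (PySem.Str.lower c) 99
      if rank < st.2 then (PySem.Str.lower c, rank) else st)
    ("internal", 99)).1

-- ===== PORT B =====
def most_sensitive_classification_py_alt (classifications : List String) : String :=
  let present : PySem.Set String := PySem.Set.ofList (classifications.map PySem.Str.lower)
  match ["restricted", "confidential", "internal", "public"].find?
      (fun level => PySem.Set.contains present level) with
  | some level => level
  | none => "internal"

-- ===== PRECONDITION & SPEC =====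
def Spec_most_sensitive_classification_py (classifications : List String) (out : String) : Prop := out = most_sensitive_classification_py_alt classifications
instance (classifications : List String) (out : String) : Decidable (Spec_most_sensitive_classification_py classifications out) := by unfold Spec_most_sensitive_classification_py; infer_instance

-- ===== CLAIM (what is proved, stated in full; the proofs are below) =====
def Claim_equal_most_sensitive_classification_py : Prop := ∀ (classifications : List String), Dom_most_sensitive_classification_py classifications → Spec_most_sensitive_classification_py classifications (most_sensitive_classification_py classifications)

-- ===== LEMMAS AND PROOFS =====

-- the rank A's literal dict assigns to a lowercased string
def pvRank (s : String) : Int :=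
  if s = "restricted" then 0 else if s = "confidential" then 1
  else if s = "internal" then 2 else if s = "public" then 3 else 99

-- the (unique) category name carrying a given rank; pvNm 99 = "internal" = A's initial best
def pvNm (r : Int) : String :=
  if r = 0 then "restricted" else if r = 1 then "confidential"
  else if r = 3 then "public" else "internal"

-- A's loop body with the dict lookup replaced by pvRank
def pvStep (st : String × Int) (c : String) : String × Int :=
  if pvRank (PySem.Str.lower c) < st.2 then (PySem.Str.lower c, pvRank (PySem.Str.lower c)) else st

lemma pvRank_dict (x : String) :
    (PySem.Dict.ofList [("restricted",(0:Int)),("confidential",1),("internal",2),("public",3)]).getD x 99 = pvRank x := by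
  have h : (PySem.Dict.ofList [("restricted",(0:Int)),("confidential",1),("internal",2),("public",3)])
      = PySem.Dict.mk [("restricted",(0:Int)),("confidential",1),("internal",2),("public",3)] := by decide
  rw [h]
  simp only [PySem.Dict.getD, PySem.Dict.get?_mk_cons, pvRank]
  split_ifs <;> simp_all [PySem.Dict.get?, beq_iff_eq]

-- characterization of A's fold from any reachable state (pvNm r, r)
set_option maxHeartbeats 1000000 in
lemma foldA_char : ∀ (xs : List String) (r : Int), (r = 0 ∨ r = 1 ∨ r = 2 ∨ r = 3 ∨ r = 99) →
    (xs.foldl pvStep (pvNm r, r)).1 =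
      if "restricted" ∈ xs.map PySem.Str.lower ∧ 0 < r then "restricted"
      else if "confidential" ∈ xs.map PySem.Str.lower ∧ 1 < r then "confidential"
      else if "internal" ∈ xs.map PySem.Str.lower ∧ 2 < r then "internal"
      else if "public" ∈ xs.map PySem.Str.lower ∧ 3 < r then "public"
      else pvNm r := by
  intro xs
  induction xs with
  | nil => intro r hr; simp
  | cons c t ih =>
    intro r hr
    by_cases l1 : PySem.Str.lower c = "restricted"
    · have hs : pvStep (pvNm r, r) c = if (0:Int) < r then (pvNm 0, 0) else (pvNm r, r) := by
        simp [pvStep, pvRank, pvNm, l1]; try (split_ifs <;> simp_all)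
      by_cases h0 : (0:Int) < r
      · simp only [List.foldl_cons, hs, if_pos h0, ih 0 (by omega)]
        rcases hr with h|h|h|h|h <;> subst h <;>
          first
          | decide
          | (exact (h0 (by omega)).elim)
          | (simp [l1]; first | done | decide | omega | (split_ifs <;> simp_all [pvNm] <;> omega))
      · simp only [List.foldl_cons, hs, if_neg h0, ih r hr]
        rcases hr with h|h|h|h|h <;> subst h <;>
          first
          | decide
          | (exact absurd (by omega) h0)
          | (simp [l1]; first | done | decide | omega | (split_ifs <;> simp_all [pvNm] <;> omega))
    · by_cases l2 : PySem.Str.lower c = "confidential"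
      · have hs : pvStep (pvNm r, r) c = if (1:Int) < r then (pvNm 1, 1) else (pvNm r, r) := by
          simp [pvStep, pvRank, pvNm, l2]; try (split_ifs <;> simp_all)
        by_cases h0 : (1:Int) < r
        · simp only [List.foldl_cons, hs, if_pos h0, ih 1 (by omega)]
          rcases hr with h|h|h|h|h <;> subst h <;>
            first
            | decide
            | (exact (h0 (by omega)).elim)
            | (simp [l1, l2]; first | done | decide | omega | (split_ifs <;> simp_all [pvNm] <;> omega))
        · simp only [List.foldl_cons, hs, if_neg h0, ih r hr]
          rcases hr with h|h|h|h|h <;> subst h <;>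
            first
            | decide
            | (exact absurd (by omega) h0)
            | (simp [l1, l2]; first | done | decide | omega | (split_ifs <;> simp_all [pvNm] <;> omega))
      · by_cases l3 : PySem.Str.lower c = "internal"
        · have hs : pvStep (pvNm r, r) c = if (2:Int) < r then (pvNm 2, 2) else (pvNm r, r) := by
            simp [pvStep, pvRank, pvNm, l3]; try (split_ifs <;> simp_all)
          by_cases h0 : (2:Int) < r
          · simp only [List.foldl_cons, hs, if_pos h0, ih 2 (by omega)]
            rcases hr with h|h|h|h|h <;> subst h <;>
              first
              | decide
              | (exact (h0 (by omega)).elim)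
              | (simp [l1, l2, l3]; first | done | decide | omega | (split_ifs <;> simp_all [pvNm] <;> omega))
          · simp only [List.foldl_cons, hs, if_neg h0, ih r hr]
            rcases hr with h|h|h|h|h <;> subst h <;>
              first
              | decide
              | (exact absurd (by omega) h0)
              | (simp [l1, l2, l3]; first | done | decide | omega | (split_ifs <;> simp_all [pvNm] <;> omega))
        · by_cases l4 : PySem.Str.lower c = "public"
          · have hs : pvStep (pvNm r, r) c = if (3:Int) < r then (pvNm 3, 3) else (pvNm r, r) := by
              simp [pvStep, pvRank, pvNm, l4]; try (split_ifs <;> simp_all)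
            by_cases h0 : (3:Int) < r
            · simp only [List.foldl_cons, hs, if_pos h0, ih 3 (by omega)]
              rcases hr with h|h|h|h|h <;> subst h <;>
                first
                | decide
                | (exact (h0 (by omega)).elim)
                | (simp [l1, l2, l3, l4]; first | done | decide | omega | (split_ifs <;> simp_all [pvNm] <;> omega))
            · simp only [List.foldl_cons, hs, if_neg h0, ih r hr]
              rcases hr with h|h|h|h|h <;> subst h <;>
                first
                | decide
                | (exact absurd (by omega) h0)
                | (simp [l1, l2, l3, l4]; first | done | decide | omega | (split_ifs <;> simp_all [pvNm] <;> omega))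
          · have hs : pvStep (pvNm r, r) c = (pvNm r, r) := by
              simp [pvStep, pvRank, l1, l2, l3, l4]
              rcases hr with h|h|h|h|h <;> subst h <;> omega
            simp only [List.foldl_cons, hs, ih r hr]
            simp [Ne.symm l1, Ne.symm l2, Ne.symm l3, Ne.symm l4]

-- characterization of B as the same membership chain
lemma alt_char (xs : List String) :
    most_sensitive_classification_py_alt xs =
      if "restricted" ∈ xs.map PySem.Str.lower then "restricted"
      else if "confidential" ∈ xs.map PySem.Str.lower then "confidential"
      else if "internal" ∈ xs.map PySem.Str.lower then "internal"
      else if "public" ∈ xs.map PySem.Str.lower then "public"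
      else "internal" := by
  have hc : ∀ y : String, PySem.Set.contains (PySem.Set.ofList (xs.map PySem.Str.lower)) y = decide (y ∈ xs.map PySem.Str.lower) := by
    intro y; simp [PySem.Set.contains, PySem.Set.mem_ofList]
  unfold most_sensitive_classification_py_alt
  simp only [List.find?, hc]
  by_cases m1 : "restricted" ∈ xs.map PySem.Str.lower <;>
    by_cases m2 : "confidential" ∈ xs.map PySem.Str.lower <;>
      by_cases m3 : "internal" ∈ xs.map PySem.Str.lower <;>
        by_cases m4 : "public" ∈ xs.map PySem.Str.lower <;>
          simp [m1, m2, m3, m4]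

-- ===== VERDICT (by name: the statement is the Claim_ definition above) =====
theorem most_sensitive_classification_py_spec : Claim_equal_most_sensitive_classification_py := by
  intro xs _
  unfold Spec_most_sensitive_classification_py
  show (List.foldl
      (fun (st : String × Int) c =>
        let rank := (PySem.Dict.ofList [("restricted",(0:Int)),("confidential",1),("internal",2),("public",3)]).getD (PySem.Str.lower c) 99
        if rank < st.2 then (PySem.Str.lower c, rank) else st)
      ("internal", 99) xs).1 = most_sensitive_classification_py_alt xs
  have hf : (fun (st : String × Int) c =>
      let rank := (PySem.Dict.ofList [("restricted",(0:Int)),("confidential",1),("internal",2),("public",3)]).getD (PySem.Str.lower c) 99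
      if rank < st.2 then (PySem.Str.lower c, rank) else st) = pvStep := by
    funext st c
    simp only [pvRank_dict, pvStep]
  rw [hf]
  have h99 : (("internal", (99:Int)) : String × Int) = (pvNm 99, 99) := rfl
  rw [h99, foldA_char xs 99 (by omega), alt_char xs]
  norm_num [pvNm]
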